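-- pv_equiv track=rewrite | github.com/surajbabar5719/CompetativeProgramming | HackerRank/Python/Practice/Algorithms/Implementation/Jumping on the Clouds: Revisited.py | jumpingOnClouds
-- ===== SOURCE A (Python) =====
-- def jumpingOnClouds(c, k):
--     j = len(c)
--     gc = j
--     while gc % k != 0:
--         gc += j
--     c = c * (gc // j)
--     c = c[::k]
--     sum_c = sum(c)
--     return 100 - len(c) - 2 * sum_c
-- ===== SOURCE B (Python) =====
-- def jumpingOnClouds(c, k):
--     n = len(c)
--     a, b = n, (k if k > 0 else -k)
--     while b:
--         a, b = b, a % b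
--     steps = n // a
--     start = 0 if k > 0 else n - 1
--     return 100 - steps - 2 * sum(c[(start + i * k) % n] for i in range(steps))
-- ===== Notes on version B (the rewrite author's own statement) =====
-- stated objective: faster
-- what changed: Instead of replicating the list to length lcm(n,|k|) and slicing with step k, B computes gcd(n,|k|) by Euclid and directly sums the n/gcd visited elements via modular indexing.
import Mathlib
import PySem

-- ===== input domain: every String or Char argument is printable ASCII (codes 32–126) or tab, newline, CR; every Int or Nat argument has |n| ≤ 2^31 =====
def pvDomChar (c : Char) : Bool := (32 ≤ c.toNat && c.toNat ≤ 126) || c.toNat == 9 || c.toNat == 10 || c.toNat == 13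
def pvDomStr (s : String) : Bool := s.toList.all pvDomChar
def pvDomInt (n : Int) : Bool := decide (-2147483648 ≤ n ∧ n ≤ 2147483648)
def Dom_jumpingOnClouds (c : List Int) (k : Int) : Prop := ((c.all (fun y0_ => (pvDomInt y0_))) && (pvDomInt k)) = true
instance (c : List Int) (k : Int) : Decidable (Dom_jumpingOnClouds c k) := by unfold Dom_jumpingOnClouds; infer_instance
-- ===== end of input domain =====

-- B replaces A's list replication to length lcm(n,|k|) + step-k slice by a Euclid gcd and a
-- direct sum of the n/gcd visited elements via modular indexing (return value only; A rebinds
-- its local c, neither mutates the argument).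

-- ===== PORT A =====
-- the 'while gc % k != 0: gc += j' loop; fuel |k| only bounds the iteration count (the loop
-- exits at gc = |k|*j at the latest, after |k|-1 increments), it changes no computed value
def jocLoop (fuel : Nat) (gc j k : Int) : Int :=
  match fuel with
  | 0 => gc
  | fuel + 1 => if PySem.Int.mod gc k ≠ 0 then jocLoop fuel (gc + j) j k else gc

def jumpingOnClouds (c : List Int) (k : Int) : Int :=
  let j := PySem.List.len c
  let gc := jocLoop k.natAbs j j k
  let c1 := PySem.List.pyRepeat c (PySem.Int.floordiv gc j)
  let c2 := (PySem.List.slice? c1 none none k).getD []   -- c[::k]; none only for k = 0, outside Pre_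
  let sum_c := c2.sum
  100 - PySem.List.len c2 - 2 * sum_c

-- ===== PORT B =====
-- termination measure fact for the Euclid loop: |a % b| < |b| for b ≠ 0 (Python mod)
theorem pvModNatAbsLt (a b : Int) (hb : b ≠ 0) : (PySem.Int.mod a b).natAbs < b.natAbs := by
  have he := @Int.fmod_eq_emod a b
  rcases lt_or_gt_of_ne hb with h | h
  · by_cases hd : b ∣ a
    · have h0 : a % b = 0 := Int.emod_eq_zero_of_dvd hd
      simp only [PySem.Int.mod]
      omega
    · have h2 : (0:Int) ≤ a % (-b) := Int.emod_nonneg a (by omega)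
      have h3 : a % (-b) < -b := Int.emod_lt_of_pos a (by omega)
      have h4 : a % b = a % (-b) := (Int.emod_neg a b).symm
      simp only [PySem.Int.mod]
      omega
  · have h2 : (0:Int) ≤ a % b := Int.emod_nonneg a (by omega)
    have h3 : a % b < b := Int.emod_lt_of_pos a h
    simp only [PySem.Int.mod]
    omega

-- the 'while b: a, b = b, a % b' Euclid loop of B
def gcdLoop (a b : Int) : Int :=
  if hb : b = 0 then a
  else gcdLoop b (PySem.Int.mod a b)
termination_by b.natAbs
decreasing_by exact pvModNatAbsLt a b hb

def jumpingOnClouds_alt (c : List Int) (k : Int) : Int :=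
  let n := PySem.List.len c
  let g := gcdLoop n (if 0 < k then k else -k)
  let steps := PySem.Int.floordiv n g
  let start : Int := if 0 < k then 0 else n - 1
  let s := ((PySem.List.pyRange 0 steps 1).map
      (fun i => PySem.List.pyGetD c (PySem.Int.mod (start + i * k) n) 0)).sum
  100 - steps - 2 * s

-- ===== PRECONDITION & SPEC =====
-- A raises ZeroDivisionError when k = 0 (gc % k) or c is empty (gc // len(c)); Pre_ excludes exactly those.
def Pre_jumpingOnClouds (c : List Int) (k : Int) : Prop := c ≠ [] ∧ k ≠ 0
instance (c : List Int) (k : Int) : Decidable (Pre_jumpingOnClouds c k) := by unfold Pre_jumpingOnClouds; infer_instance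
def pvWitness_jumpingOnClouds : List Int × Int := ([0, 1], 2)

def Spec_jumpingOnClouds (c : List Int) (k : Int) (out : Int) : Prop := out = jumpingOnClouds_alt c k
instance (c : List Int) (k : Int) (out : Int) : Decidable (Spec_jumpingOnClouds c k out) := by unfold Spec_jumpingOnClouds; infer_instance

-- ===== CLAIM (what is proved, stated in full; the proofs are below) =====
def Claim_equal_jumpingOnClouds : Prop := ∀ (c : List Int) (k : Int), Dom_jumpingOnClouds c k → Pre_jumpingOnClouds c k → Spec_jumpingOnClouds c k (jumpingOnClouds c k)

-- ===== LEMMAS AND PROOFS =====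

theorem pvGcdLoopEq : ∀ (b a : Nat), gcdLoop (a : Int) (b : Int) = (Nat.gcd a b : Int) := by
  intro b
  induction b using Nat.strong_induction_on with
  | _ b ih =>
    intro a
    rw [gcdLoop]
    by_cases hb : b = 0
    · subst hb; simp
    · have hbz : ((b : Int)) ≠ 0 := by exact_mod_cast hb
      rw [dif_neg hbz]
      have hmod : PySem.Int.mod (a : Int) (b : Int) = ((a % b : Nat) : Int) := by
        simp only [PySem.Int.mod, Int.fmod_eq_emod]
        have : (0:Int) ≤ (b:Int) := by positivity
        simp [this]
      rw [hmod, ih (a % b) (Nat.mod_lt a (Nat.pos_of_ne_zero hb))]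
      rw [Nat.gcd_comm a b, Nat.gcd_rec b a]
      rw [Nat.gcd_comm (a % b) b]

theorem pvKeyDvd (n K m : Nat) (hn : 0 < n) (_hK : 0 < K) :
    K ∣ m * n ↔ (K / Nat.gcd n K) ∣ m := by
  set g := Nat.gcd n K with hg
  have hgpos : 0 < g := Nat.gcd_pos_of_pos_left K hn
  have hgn : g ∣ n := Nat.gcd_dvd_left n K
  have hgK : g ∣ K := Nat.gcd_dvd_right n K
  have hco : Nat.Coprime (n / g) (K / g) := Nat.coprime_div_gcd_div_gcd hgpos
  constructor
  · intro hdvd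
    have h1 : (K / g) ∣ m * (n / g) := by
      have h2 : K / g * g ∣ m * (n / g) * g := by
        rw [Nat.div_mul_cancel hgK]
        rw [mul_assoc, Nat.div_mul_cancel hgn]
        exact hdvd
      exact (Nat.mul_dvd_mul_iff_right hgpos).mp h2
    exact (Nat.Coprime.dvd_of_dvd_mul_right hco.symm) h1
  · rintro ⟨t, ht⟩
    refine ⟨t * (n / g), ?_⟩
    rw [ht]
    calc K / g * t * n = K / g * t * (n / g * g) := by rw [Nat.div_mul_cancel hgn]
    _ = K / g * g * (t * (n / g)) := by ring
    _ = K * (t * (n / g)) := by rw [Nat.div_mul_cancel hgK]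

theorem pvJocLoopEq (n K : Nat) (k : Int) (hn : 0 < n) (hk : k ≠ 0) (hK : K = k.natAbs) :
    ∀ (fuel m : Nat), 1 ≤ m → m ≤ K / Nat.gcd n K → K / Nat.gcd n K ≤ m + fuel →
      jocLoop fuel ((m * n : Nat) : Int) (n : Int) k = (((K / Nat.gcd n K) * n : Nat) : Int) := by
  have hKpos : 0 < K := by subst hK; omega
  have hk'pos : 0 < K / Nat.gcd n K :=
    Nat.div_pos (Nat.le_of_dvd hKpos (Nat.gcd_dvd_right n K)) (Nat.gcd_pos_of_pos_left K hn)
  have divIff : ∀ m : Nat, (PySem.Int.mod ((m * n : Nat) : Int) k = 0) ↔ (K / Nat.gcd n K) ∣ m := by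
    intro m
    rw [PySem.Int.mod_eq_zero_iff_dvd]
    rw [← Int.natAbs_dvd, ← hK, Int.natCast_dvd_natCast]
    exact pvKeyDvd n K m hn hKpos
  intro fuel
  induction fuel with
  | zero =>
    intro m h1 h2 h3
    have : m = K / Nat.gcd n K := by omega
    subst this
    rfl
  | succ fuel ih =>
    intro m h1 h2 h3
    show (if PySem.Int.mod ((m * n : Nat) : Int) k ≠ 0 then
        jocLoop fuel (((m * n : Nat) : Int) + (n : Int)) (n : Int) k else ((m * n : Nat) : Int)) = _
    by_cases hdvd : (K / Nat.gcd n K) ∣ m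
    · have hm : m = K / Nat.gcd n K := le_antisymm h2 (Nat.le_of_dvd (by omega) hdvd)
      rw [if_neg (by rw [ne_eq, not_not, divIff]; exact hdvd)]
      rw [hm]
    · have hne : m ≠ K / Nat.gcd n K := fun he => hdvd (he ▸ dvd_refl _)
      rw [if_pos (by rw [ne_eq, divIff]; exact hdvd)]
      have hcast : ((m * n : Nat) : Int) + (n : Int) = (((m + 1) * n : Nat) : Int) := by
        push_cast; ring
      rw [hcast]
      exact ih (m + 1) (by omega) (by omega) (by omega)

theorem pvFilterMapEqMap {α β : Type} (l : List α) (f : α → Option β) (g : α → β)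
    (h : ∀ x ∈ l, f x = some (g x)) : l.filterMap f = l.map g := by
  induction l with
  | nil => rfl
  | cons x t ih =>
    rw [List.filterMap_cons, h x (List.mem_cons_self), List.map_cons,
      ih (fun y hy => h y (List.mem_cons_of_mem _ hy))]

theorem pvFlattenRepLen (c : List Int) (m : Nat) :
    ((List.replicate m c).flatten).length = m * c.length := by
  induction m with
  | zero => simp
  | succ m ih => simp [List.replicate_succ, ih]; ring

theorem pvFlattenRepGet (c : List Int) (m t : Nat) (ht : t < m * c.length) :
    ((List.replicate m c).flatten)[t]? = (c)[t % c.length]? := by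
  induction m generalizing t with
  | zero => omega
  | succ m ih =>
    rw [List.replicate_succ, List.flatten_cons]
    have ht' : t < m * c.length + c.length := by rw [Nat.succ_mul] at ht; exact ht
    by_cases h : t < c.length
    · rw [List.getElem?_append_left h, Nat.mod_eq_of_lt h]
    · have key : ∀ L, t < L + c.length → c.length ≤ t → t - c.length < L := by
        intro L h1 h2; omega
      rw [List.getElem?_append_right (by omega : c.length ≤ t), Nat.mod_eq_sub_mod (by omega : c.length ≤ t),
        ih (t - c.length) (key _ ht' (by omega))]

theorem pvRepGetD (c : List Int) (m t : Nat) (ht : t < m * c.length) :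
    ((List.replicate m c).flatten).getD t 0 = c.getD (t % c.length) 0 := by
  rw [List.getD_eq_getElem?_getD, List.getD_eq_getElem?_getD, pvFlattenRepGet c m t ht]

theorem pvSlicePos (xs : List Int) (K : Nat) (hK : 0 < K) (hdvd : K ∣ xs.length) :
    PySem.List.slice? xs none none (K : Int) =
      some ((List.range (xs.length / K)).map (fun i => xs.getD (K * i) 0)) := by
  have hKz : ((K:Int)) ≠ 0 := by exact_mod_cast hK.ne'
  have hKneg : ¬ ((K:Int) < 0) := by exact_mod_cast not_lt.mpr (Nat.zero_le K)
  simp only [PySem.List.slice?, PySem.List.sliceIndices, if_neg hKz, if_neg hKneg, if_pos (by exact_mod_cast hK : (0:Int) < (K:Int))]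
  obtain ⟨q, hq⟩ := hdvd
  have hcnt : (if 0 < (xs.length:Int) then (((xs.length:Int) - 0 + (K:Int) - 1) / (K:Int)).toNat else 0) = q := by
    by_cases h0 : 0 < xs.length
    · rw [if_pos (by exact_mod_cast h0)]
      have he : ((xs.length:Int) - 0 + (K:Int) - 1) = ((K:Int) - 1) + (q:Int) * (K:Int) := by
        push_cast [hq]; ring
      rw [he, Int.add_mul_ediv_right _ _ hKz,
        Int.ediv_eq_zero_of_lt (by omega) (by omega)]
      simp
    · rw [if_neg (by exact_mod_cast h0)]
      have : K * q = 0 := by omega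
      have : q = 0 := by
        rcases Nat.mul_eq_zero.mp this with h | h
        · omega
        · exact h
      omega
  have hlen : xs.length / K = q := by rw [hq, Nat.mul_div_cancel_left q hK]
  rw [hcnt, hlen]
  congr 1
  apply pvFilterMapEqMap
  intro i hi
  have hi' : i < q := List.mem_range.mp hi
  have hidx : ((0:Int) + (K:Int) * (i:Int)).toNat = K * i := by
    have he : ((0:Int) + (K:Int) * (i:Int)) = ((K * i : Nat) : Int) := by push_cast; ring
    rw [he, Int.toNat_natCast]
  have hb : K * i < xs.length := by
    rw [hq]; exact (Nat.mul_lt_mul_left hK).mpr hi'  -- check direction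
  rw [hidx, List.getElem?_eq_getElem hb, List.getD_eq_getElem xs 0 hb]

theorem pvSliceNeg (xs : List Int) (K : Nat) (hK : 0 < K) (hdvd : K ∣ xs.length)
    (hlen : 0 < xs.length) :
    PySem.List.slice? xs none none (-(K : Int)) =
      some ((List.range (xs.length / K)).map (fun i => xs.getD (xs.length - 1 - K * i) 0)) := by
  obtain ⟨q, hq⟩ := hdvd
  have hq0 : 0 < q := by
    rcases Nat.eq_zero_or_pos q with h | h
    · rw [h, Nat.mul_zero] at hq; omega
    · exact h
  have hKz : (-(K:Int)) ≠ 0 := by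
    simp only [ne_eq, neg_eq_zero]
    exact_mod_cast hK.ne'
  have hneg : (-(K:Int)) < 0 := by
    simp only [Left.neg_neg_iff]
    exact_mod_cast hK
  simp only [PySem.List.slice?, PySem.List.sliceIndices, if_neg hKz, if_pos hneg,
    if_neg (not_lt.mpr hneg.le)]
  have hcond : (-1 : Int) < (xs.length : Int) - 1 := by
    have : (1:Int) ≤ (xs.length : Int) := by exact_mod_cast hlen
    omega
  rw [if_pos hcond]
  have hcnt : ((((xs.length:Int) - 1) - (-1) + (K:Int) - 1) / (K:Int)).toNat = q := by
    have he : (((xs.length:Int) - 1) - (-1) + (K:Int) - 1) = ((K:Int) - 1) + (q:Int) * (K:Int) := by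
      push_cast [hq]; ring
    rw [he, Int.add_mul_ediv_right _ _ (by exact_mod_cast hK.ne' : ((K:Int)) ≠ 0),
      Int.ediv_eq_zero_of_lt (by omega) (by omega)]
    simp
  have hlen' : xs.length / K = q := by rw [hq, Nat.mul_div_cancel_left q hK]
  simp only [neg_neg]
  rw [hcnt, hlen']
  congr 1
  apply pvFilterMapEqMap
  intro i hi
  have hi' : i < q := List.mem_range.mp hi
  have hble : K * i + K ≤ xs.length := by
    rw [hq]
    have : i + 1 ≤ q := hi'
    calc K * i + K = K * (i + 1) := by ring
    _ ≤ K * q := Nat.mul_le_mul_left K this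
  have hidx : (((xs.length:Int) - 1) + (-(K:Int)) * (i:Int)).toNat = xs.length - 1 - K * i := by
    have he : (((xs.length:Int) - 1) + (-(K:Int)) * (i:Int)) = ((xs.length - 1 - K * i : Nat) : Int) := by
      rw [show (-(K:Int)) * (i:Int) = -((K * i : Nat) : Int) by push_cast; ring]
      omega
    rw [he, Int.toNat_natCast]
  have hb : xs.length - 1 - K * i < xs.length := by omega
  rw [hidx, List.getElem?_eq_getElem hb, List.getD_eq_getElem xs 0 hb]

theorem jumpingOnClouds_eq_alt (c : List Int) (k : Int) (hc : c ≠ []) (hk : k ≠ 0) :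
    jumpingOnClouds c k = jumpingOnClouds_alt c k := by
  have hn : 0 < c.length := List.length_pos_iff.mpr hc
  set n := c.length with hnd
  set K := k.natAbs with hKd
  have hKpos : 0 < K := by omega
  set g := Nat.gcd n K with hgd
  have hgpos : 0 < g := Nat.gcd_pos_of_pos_left K hn
  set k' := K / g with hk'd
  set n' := n / g with hn'd
  have hk'pos : 0 < k' := Nat.div_pos (Nat.le_of_dvd hKpos (Nat.gcd_dvd_right n K)) hgpos
  have hk'le : k' ≤ K := Nat.div_le_self K g
  -- A's loop value
  have hloop : jocLoop k.natAbs ((n : Nat) : Int) (n : Int) k = ((k' * n : Nat) : Int) := by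
    have h1 := pvJocLoopEq n K k hn hk rfl K 1 le_rfl hk'pos (le_trans hk'le (by omega))
    simp only [one_mul] at h1
    exact h1
  -- the replicated list
  have hfd : PySem.Int.floordiv ((k' * n : Nat) : Int) ((n : Nat) : Int) = (k' : Int) := by
    rw [PySem.Int.floordiv_natCast, Nat.mul_div_cancel _ hn]
  have hrep : PySem.List.pyRepeat c ((k' : Nat) : Int) = (List.replicate k' c).flatten := by
    simp [PySem.List.pyRepeat]
  have hggK : g * k' = K := Nat.mul_div_cancel' (Nat.gcd_dvd_right n K)
  have hggn : g * n' = n := Nat.mul_div_cancel' (Nat.gcd_dvd_left n K)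
  have hLK : k' * n = K * n' := by
    calc k' * n = k' * (g * n') := by rw [hggn]
    _ = (g * k') * n' := by ring
    _ = K * n' := by rw [hggK]
  have hdvdL : K ∣ (List.replicate k' c).flatten.length := by
    rw [pvFlattenRepLen, hLK]; exact Dvd.intro n' rfl
  have hLdiv : (List.replicate k' c).flatten.length / K = n' := by
    rw [pvFlattenRepLen, hLK, Nat.mul_div_cancel_left n' hKpos]
  simp only [jumpingOnClouds, jumpingOnClouds_alt, PySem.List.len]
  rw [← hnd, hloop, hfd, hrep]
  rcases lt_or_gt_of_ne hk with hneg | hpos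
  · -- k < 0
    have hkK : ((K : Nat) : Int) = -k := by
      rw [hKd]; omega
    have hif : (if 0 < k then k else -k) = ((K : Nat) : Int) := by
      rw [if_neg (not_lt.mpr hneg.le), hkK]
    have hif2 : (if 0 < k then (0:Int) else (n:Int) - 1) = (n:Int) - 1 :=
      if_neg (not_lt.mpr hneg.le)
    have hkneg : k = -((K : Nat) : Int) := by omega
    have hLpos : 0 < (List.replicate k' c).flatten.length := by
      rw [pvFlattenRepLen]
      exact Nat.mul_pos hk'pos hn
    rw [hif, hif2, pvGcdLoopEq K n, ← hgd, PySem.Int.floordiv_natCast, ← hn'd,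
      hkneg, pvSliceNeg _ K hKpos hdvdL hLpos, hLdiv]
    simp only [Option.getD_some, List.length_map, List.length_range]
    rw [PySem.List.pyRange_one, List.map_map]
    simp only [Int.sub_zero, Int.toNat_natCast, zero_add]
    congr 1
    congr 1
    congr 1
    apply List.map_congr_left
    intro i hi
    have hi' : i < n' := List.mem_range.mp hi
    have hKi : K * i + K ≤ k' * c.length := by
      rw [← hnd, hLK]
      calc K * i + K = K * (i + 1) := by ring
      _ ≤ K * n' := Nat.mul_le_mul_left K hi'
    have hbound : (List.replicate k' c).flatten.length - 1 - K * i < k' * c.length := by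
      rw [pvFlattenRepLen]
      omega
    rw [pvRepGetD c k' _ hbound, pvFlattenRepLen]
    show c.getD ((k' * c.length - 1 - K * i) % c.length) 0 =
      PySem.List.pyGetD c (PySem.Int.mod (((n:Int) - 1) + (i:Int) * -((K:Nat):Int)) (n:Int)) 0
    rw [PySem.Int.mod_eq_emod_of_pos (by exact_mod_cast hn : (0:Int) < (n:Int))]
    have hmodeq : (((n:Int) - 1) + (i:Int) * -((K:Nat):Int)) % (n:Int)
        = (((k' * c.length - 1 - K * i : Nat)) : Int) % (n:Int) := by
      have hdiff : (((k' * c.length - 1 - K * i : Nat)) : Int)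
          - (((n:Int) - 1) + (i:Int) * -((K:Nat):Int)) = (n:Int) * ((k':Int) - 1) := by
        have h1 : (((k' * c.length - 1 - K * i : Nat)) : Int)
            = ((k' * c.length : Nat) : Int) - 1 - ((K * i : Nat) : Int) := by omega
        rw [h1, hnd]
        push_cast
        ring
      exact Int.modEq_iff_dvd.mpr ⟨(k':Int) - 1, hdiff⟩
    rw [hmodeq, ← Int.natCast_mod, PySem.List.pyGetD_natCast, ← hnd]
  · -- k > 0
    have hkK : ((K : Nat) : Int) = k := Int.natAbs_of_nonneg hpos.le
    have hif : (if 0 < k then k else -k) = ((K : Nat) : Int) := by rw [if_pos hpos, hkK]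
    have hif2 : (if 0 < k then (0:Int) else (n:Int) - 1) = 0 := if_pos hpos
    rw [hif, hif2, pvGcdLoopEq K n, ← hgd, PySem.Int.floordiv_natCast, ← hn'd,
      ← hkK, pvSlicePos _ K hKpos hdvdL, hLdiv]
    simp only [Option.getD_some, List.length_map, List.length_range]
    rw [PySem.List.pyRange_one, List.map_map]
    simp only [Int.sub_zero, Int.toNat_natCast, zero_add]
    congr 1
    congr 1
    congr 1
    apply List.map_congr_left
    intro i hi
    have hi' : i < n' := List.mem_range.mp hi
    have hbound : K * i < k' * c.length := by
      rw [← hnd, hLK]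
      exact (Nat.mul_lt_mul_left hKpos).mpr hi'
    rw [pvRepGetD c k' (K * i) hbound, ← hnd]
    show c.getD (K * i % n) 0 = PySem.List.pyGetD c (PySem.Int.mod ((i:Int) * ((K:Nat):Int)) (n:Int)) 0
    have hcast : ((i : Int)) * ((K:Nat):Int) = (((i * K : Nat)) : Int) := by push_cast; ring
    rw [hcast, PySem.Int.mod_natCast, PySem.List.pyGetD_natCast]
    rw [Nat.mul_comm K i]

-- ===== VERDICT (by name: the statement is the Claim_ definition above) =====
theorem jumpingOnClouds_spec : Claim_equal_jumpingOnClouds := by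
  intro c k _ hpre
  exact jumpingOnClouds_eq_alt c k hpre.1 hpre.2
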